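-- pv_equiv track=rewrite | github.com/wlgud0402/-algorithm.py | _29_samesame2.py | same_same
-- ===== SOURCE A (Python) =====
-- def same_same(put_str):
--
--     i = 0
--     j = len(put_str) -1
--     while i < j:
--         if put_str[i].isalpha() == False:
--             i += 1
--
--         elif put_str[j].isalpha() == False:
--             j -= 1
--
--         elif put_str[i].lower() != put_str[j].lower():
--             return False
--
--         else:
--             i += 1
--             j -= 1
--
--     return True
-- ===== SOURCE B (Python) =====
-- def same_same(put_str):
--     s = [c.lower() for c in put_str if c.isalpha()]
--     return s == s[::-1]
-- ===== Notes on version B (the rewrite author's own statement) =====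
-- stated objective: simpler
-- what changed: B builds the normalized list (lowercased alphabetic chars) in one filtering comprehension and compares it with its reversal, replacing A's interleaved two-pointer while-loop with its three-way branch state.
import Mathlib
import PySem

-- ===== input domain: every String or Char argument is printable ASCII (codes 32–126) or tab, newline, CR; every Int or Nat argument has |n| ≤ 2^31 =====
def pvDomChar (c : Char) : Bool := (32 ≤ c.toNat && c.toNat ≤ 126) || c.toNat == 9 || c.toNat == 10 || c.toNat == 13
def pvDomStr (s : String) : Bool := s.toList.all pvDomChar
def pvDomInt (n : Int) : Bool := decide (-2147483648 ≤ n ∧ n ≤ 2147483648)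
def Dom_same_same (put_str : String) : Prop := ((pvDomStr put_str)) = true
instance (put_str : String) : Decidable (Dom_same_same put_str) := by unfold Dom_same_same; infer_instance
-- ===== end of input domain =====

-- B replaces A's interleaved two-pointer scan by one normalizing pass followed by a reverse comparison (objective: simpler).

-- ===== PORT A =====
-- two-pointer while-loop of A; indices stay in [0, len) whenever dereferenced (i < j)
def sameLoop (cs : List Char) (i j : Nat) : Bool :=
  if _h : i < j then
    if PySem.Chars.isalpha (cs.getD i ' ') = false then
      sameLoop cs (i+1) j
    else if PySem.Chars.isalpha (cs.getD j ' ') = false then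
      sameLoop cs i (j-1)
    else if PySem.Chars.lowerChar (cs.getD i ' ') ≠ PySem.Chars.lowerChar (cs.getD j ' ') then
      false
    else
      sameLoop cs (i+1) (j-1)
  else
    true
termination_by j - i
decreasing_by all_goals omega

def same_same (put_str : String) : Bool :=
  sameLoop put_str.toList 0 (put_str.toList.length - 1)

-- ===== PORT B =====
def same_same_alt (put_str : String) : Bool :=
  let s := (put_str.toList.filter PySem.Chars.isalpha).map PySem.Chars.lowerChar
  s == s.reverse

-- ===== PRECONDITION & SPEC =====
def Spec_same_same (put_str : String) (out : Bool) : Prop := out = same_same_alt put_str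
instance (put_str : String) (out : Bool) : Decidable (Spec_same_same put_str out) := by unfold Spec_same_same; infer_instance

-- ===== CLAIM (what is proved, stated in full; the proofs are below) =====
def Claim_equal_same_same : Prop := ∀ (put_str : String), Dom_same_same put_str → Spec_same_same put_str (same_same put_str)

-- ===== LEMMAS AND PROOFS =====
-- normalized segment: lowercased alphabetic chars of cs[i..j]
def normSeg (cs : List Char) : List Char :=
  (cs.filter PySem.Chars.isalpha).map PySem.Chars.lowerChar

lemma pal_short (l : List Char) (h : l.length ≤ 1) : (l == l.reverse) = true := by
  match l, h with
  | [], _ => rfl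
  | [a], _ => simp

lemma pal_sandwich (a b : Char) (l : List Char) :
    ((a :: (l ++ [b])) == (a :: (l ++ [b])).reverse) = (a == b && (l == l.reverse)) := by
  have hrev : (a :: (l ++ [b])).reverse = b :: (l.reverse ++ [a]) := by simp
  rw [hrev]
  by_cases hab : a = b
  · subst hab
    simp
  · have hf : (a == b) = false := beq_eq_false_iff_ne.mpr hab
    simp [hf]

lemma normSeg_short (cs : List Char) (h : cs.length ≤ 1) : (normSeg cs).length ≤ 1 := by
  calc (normSeg cs).length ≤ cs.length := by
        simp only [normSeg, List.length_map]; exact List.length_filter_le _ _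
    _ ≤ 1 := h

lemma sameLoop_eq (cs : List Char) (i j : Nat) (hj : j < cs.length) :
    sameLoop cs i j = (normSeg ((cs.drop i).take (j + 1 - i)) ==
      (normSeg ((cs.drop i).take (j + 1 - i))).reverse) := by
  fun_induction sameLoop cs i j with
  | case1 i j hij h1 ih =>
    -- cs[i] not alpha
    have hi : i < cs.length := by omega
    have hdrop : cs.drop i = cs[i] :: cs.drop (i+1) := List.drop_eq_getElem_cons hi
    have hseg : (cs.drop i).take (j + 1 - i) = cs[i] :: (cs.drop (i+1)).take (j + 1 - (i+1)) := by
      rw [hdrop]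
      have : j + 1 - i = (j + 1 - (i+1)) + 1 := by omega
      rw [this, List.take_succ_cons]
    rw [hseg]
    have hg : cs.getD i ' ' = cs[i] := List.getD_eq_getElem cs ' ' hi
    rw [ih hj]
    simp [normSeg, hg ▸ h1]
  | case2 i j hij h1 h2 ih =>
    -- cs[j] not alpha
    have hi : i < cs.length := by omega
    have hseg : (cs.drop i).take (j + 1 - i) = (cs.drop i).take (j - i) ++ [cs[j]] := by
      have h1' : j + 1 - i = (j - i) + 1 := by omega
      rw [h1', List.take_add_one]
      have hlt : j - i < (cs.drop i).length := by simp; omega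
      have : (cs.drop i)[j - i]? = some cs[j] := by
        rw [List.getElem?_eq_getElem hlt]
        congr 1
        rw [List.getElem_drop]
        congr 1
        omega
      simp [this]
    have hj' : j - 1 < cs.length := by omega
    have hseg' : j - 1 + 1 - i = j - i := by omega
    rw [hseg]
    have hg : cs.getD j ' ' = cs[j] := List.getD_eq_getElem cs ' ' (by omega)
    rw [ih hj', hseg']
    simp [normSeg, hg ▸ h2]
  | case3 i j hij h1 h2 h3 =>
    -- both alpha, lowercase mismatch
    have hi : i < cs.length := by omega
    have hseg : (cs.drop i).take (j + 1 - i)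
        = cs[i] :: ((cs.drop (i+1)).take (j - (i+1)) ++ [cs[j]]) := by
      rw [List.drop_eq_getElem_cons hi]
      have : j + 1 - i = (j - (i+1) + 1) + 1 := by omega
      rw [this, List.take_succ_cons, List.take_add_one]
      have hlt : j - (i+1) < (cs.drop (i+1)).length := by simp; omega
      have : (cs.drop (i+1))[j - (i+1)]? = some cs[j] := by
        rw [List.getElem?_eq_getElem hlt]
        congr 1
        rw [List.getElem_drop]
        congr 1
        omega
      simp [this]
    rw [hseg]
    have hgi : cs.getD i ' ' = cs[i] := List.getD_eq_getElem cs ' ' hi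
    have hgj : cs.getD j ' ' = cs[j] := List.getD_eq_getElem cs ' ' (by omega)
    have hai : PySem.Chars.isalpha cs[i] = true := by
      rw [← hgi]; revert h1; cases PySem.Chars.isalpha (cs.getD i ' ') <;> simp
    have haj : PySem.Chars.isalpha cs[j] = true := by
      rw [← hgj]; revert h2; cases PySem.Chars.isalpha (cs.getD j ' ') <;> simp
    have hne : PySem.Chars.lowerChar cs[i] ≠ PySem.Chars.lowerChar cs[j] := by
      rw [← hgi, ← hgj]; exact h3
    have hnorm : normSeg (cs[i] :: ((cs.drop (i+1)).take (j - (i+1)) ++ [cs[j]]))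
        = PySem.Chars.lowerChar cs[i] ::
          (normSeg ((cs.drop (i+1)).take (j - (i+1))) ++ [PySem.Chars.lowerChar cs[j]]) := by
      simp [normSeg, hai, haj]
    rw [hnorm, pal_sandwich]
    simp [hne]
  | case4 i j hij h1 h2 h3 ih =>
    -- both alpha, lowercase match
    have hi : i < cs.length := by omega
    have hseg : (cs.drop i).take (j + 1 - i)
        = cs[i] :: ((cs.drop (i+1)).take (j - (i+1)) ++ [cs[j]]) := by
      rw [List.drop_eq_getElem_cons hi]
      have : j + 1 - i = (j - (i+1) + 1) + 1 := by omega
      rw [this, List.take_succ_cons, List.take_add_one]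
      have hlt : j - (i+1) < (cs.drop (i+1)).length := by simp; omega
      have : (cs.drop (i+1))[j - (i+1)]? = some cs[j] := by
        rw [List.getElem?_eq_getElem hlt]
        congr 1
        rw [List.getElem_drop]
        congr 1
        omega
      simp [this]
    rw [hseg]
    have hgi : cs.getD i ' ' = cs[i] := List.getD_eq_getElem cs ' ' hi
    have hgj : cs.getD j ' ' = cs[j] := List.getD_eq_getElem cs ' ' (by omega)
    have hai : PySem.Chars.isalpha cs[i] = true := by
      rw [← hgi]; revert h1; cases PySem.Chars.isalpha (cs.getD i ' ') <;> simp
    have haj : PySem.Chars.isalpha cs[j] = true := by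
      rw [← hgj]; revert h2; cases PySem.Chars.isalpha (cs.getD j ' ') <;> simp
    have heq : PySem.Chars.lowerChar cs[i] = PySem.Chars.lowerChar cs[j] := by
      rw [← hgi, ← hgj]; by_contra hc; exact h3 hc
    have hnorm : normSeg (cs[i] :: ((cs.drop (i+1)).take (j - (i+1)) ++ [cs[j]]))
        = PySem.Chars.lowerChar cs[i] ::
          (normSeg ((cs.drop (i+1)).take (j - (i+1))) ++ [PySem.Chars.lowerChar cs[j]]) := by
      simp [normSeg, hai, haj]
    rw [hnorm, pal_sandwich]
    have hj' : j - 1 < cs.length := by omega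
    have harg : j - 1 + 1 - (i + 1) = j - (i+1) := by omega
    rw [ih hj', harg]
    simp [heq]
  | case5 i j hij =>
    -- i ≥ j: segment has at most one element
    have hshort : ((cs.drop i).take (j + 1 - i)).length ≤ 1 := by
      simp only [List.length_take, List.length_drop]
      omega
    exact (pal_short _ (normSeg_short _ hshort)).symm

-- ===== VERDICT (by name: the statement is the Claim_ definition above) =====
theorem same_same_spec : Claim_equal_same_same := by
  unfold Claim_equal_same_same Spec_same_same same_same same_same_alt
  intro s _
  match h : s.toList with
  | [] => simp [sameLoop]
  | c :: cs =>
    have hj : (c :: cs).length - 1 < (c :: cs).length := by simp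
    rw [sameLoop_eq _ 0 _ hj]
    have : ((c :: cs).drop 0).take ((c :: cs).length - 1 + 1 - 0) = c :: cs := by
      simp
    rw [this]
    rfl
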